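-- pv_equiv track=rewrite | github.com/elenshahbazyan/Graph-Theory | 2nd midterm/magic cows.py | build_dp
-- ===== SOURCE A (Python) =====
-- MAX_DAYS = 50
--
-- def build_dp(C):
--     dp = [[0] * (C + 1) for _ in range(MAX_DAYS + 1)]
--     for cows in range(C + 1):
--         dp[0][cows] = 1
--     for day in range(1, MAX_DAYS + 1):
--         for cows in range(C + 1):
--             doubled = cows * 2
--             if doubled <= C:
--                 dp[day][cows] = dp[day - 1][doubled]
--                 continue
--             full, rest = divmod(doubled, C)
--             farms = full * dp[day - 1][C]
--             if rest:
--                 farms += dp[day - 1][rest]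
--             dp[day][cows] = farms
--     return dp
-- ===== SOURCE B (Python) =====
-- MAX_DAYS = 50
--
-- def build_dp(C):
--     # Top-down memoized recursion instead of A's eager bottom-up row-by-row fill:
--     # cells are computed lazily, on demand, by the recurrence itself.
--     n = C + 1
--     memo = [[None] * n for _ in range(MAX_DAYS + 1)]
--
--     def f(day, cows):
--         r = memo[day][cows]
--         if r is None:
--             if day == 0:
--                 r = 1
--             else:
--                 doubled = cows * 2
--                 if doubled <= C:
--                     r = f(day - 1, doubled)
--                 else:
--                     full, rest = divmod(doubled, C)
--                     r = full * f(day - 1, C)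
--                     if rest:
--                         r += f(day - 1, rest)
--             memo[day][cows] = r
--         return r
--
--     for day in range(MAX_DAYS + 1):
--         for cows in range(n):
--             f(day, cows)
--     return memo
-- ===== Notes on version B (the rewrite author's own statement) =====
-- stated objective: alternative
-- what changed: Replaced A's eager bottom-up fill of the whole 51x(C+1) table (preallocated zero matrix mutated row by row) with a top-down memoized recursion f(day, cows) on the recurrence, the table then assembled by evaluating f at each cell.
import Mathlib
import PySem

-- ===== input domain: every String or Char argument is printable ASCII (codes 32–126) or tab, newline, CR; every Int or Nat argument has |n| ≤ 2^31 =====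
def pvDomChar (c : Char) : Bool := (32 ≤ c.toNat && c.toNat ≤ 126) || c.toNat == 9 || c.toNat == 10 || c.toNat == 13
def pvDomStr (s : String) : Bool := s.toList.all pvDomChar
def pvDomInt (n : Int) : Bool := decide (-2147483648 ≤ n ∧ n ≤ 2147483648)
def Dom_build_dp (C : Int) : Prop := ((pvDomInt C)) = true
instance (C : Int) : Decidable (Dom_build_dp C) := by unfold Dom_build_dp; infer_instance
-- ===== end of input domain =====

-- B replaces A's eager bottom-up row-by-row fill of the 51×(C+1) table by a lazy top-down
-- memoized recursion f(day, cows), the memo threaded through the port as explicit state;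
-- objective: alternative decomposition, same results.

-- ===== PORT A =====
-- Transliteration of A. dp[day][cows] = v  →  List.modify at index day; dp[day-1][x]  →
-- pyGetD row x 0, exact here because every read index is in range (0 ≤ x ≤ C < C+1), so
-- Python never raises; divmod's divisor C is nonzero whenever that branch runs.
def build_dp (C : Int) : List (List Int) :=
  let dp0 : List (List Int) := List.replicate 51 (List.replicate (C + 1).toNat 0)
  let dp1 := (PySem.List.pyRange 0 (C + 1) 1).foldl
    (fun dp cows => dp.modify 0 (fun row => row.set cows.toNat 1)) dp0
  (PySem.List.pyRange 1 51 1).foldl (fun dp day =>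
    (PySem.List.pyRange 0 (C + 1) 1).foldl (fun dp cows =>
      let doubled := cows * 2
      let v :=
        if doubled ≤ C then
          PySem.List.pyGetD (PySem.List.pyGetD dp (day - 1) []) doubled 0
        else
          let full := PySem.Int.floordiv doubled C
          let rest := PySem.Int.mod doubled C
          let farms := full * PySem.List.pyGetD (PySem.List.pyGetD dp (day - 1) []) C 0
          if rest ≠ 0 then farms + PySem.List.pyGetD (PySem.List.pyGetD dp (day - 1) []) rest 0
          else farms
      dp.modify day.toNat (fun row => row.set cows.toNat v)) dp) dp1

-- ===== PORT B =====
-- B's memoized recursive f(day, cows): the memo table (a 51×(C+1) matrix of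
-- not-yet-computed/computed cells, Option Int) is threaded through the recursion as state;
-- day is a count, recursed on as a Nat. memo[day][cows] reads are in range whenever B runs.
def fMemo (C : Int) : List (List (Option Int)) → Nat → Int → Int × List (List (Option Int))
  | memo, day, cows =>
    match PySem.List.pyGetD (PySem.List.pyGetD memo (day : Int) []) cows none with
    | some r => (r, memo)
    | none =>
      let rm : Int × List (List (Option Int)) :=
        match day with
        | 0 => (1, memo)
        | d + 1 =>
          let doubled := cows * 2
          if doubled ≤ C then fMemo C memo d doubled
          else
            let full := PySem.Int.floordiv doubled C
            let rest := PySem.Int.mod doubled C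
            let vm := fMemo C memo d C
            let r0 := full * vm.1
            if rest ≠ 0 then
              let vm2 := fMemo C vm.2 d rest
              (r0 + vm2.1, vm2.2)
            else (r0, vm.2)
      (rm.1, rm.2.modify day (fun row => row.set cows.toNat (some rm.1)))
termination_by memo day cows => day

-- the driver double loop forces every cell; the final map strips the Option wrapper
-- (every cell has been computed, so `.getD 0` never supplies the default)
def build_dp_alt (C : Int) : List (List Int) :=
  let n := C + 1
  let memo0 : List (List (Option Int)) := List.replicate 51 (List.replicate n.toNat none)
  let memoF := (PySem.List.pyRange 0 51 1).foldl (fun memo day =>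
    (PySem.List.pyRange 0 n 1).foldl (fun memo cows => (fMemo C memo day.toNat cows).2) memo) memo0
  memoF.map (fun row => row.map (fun o => o.getD 0))

-- ===== PRECONDITION & SPEC =====
def Spec_build_dp (C : Int) (out : List (List Int)) : Prop := out = build_dp_alt C
instance (C : Int) (out : List (List Int)) : Decidable (Spec_build_dp C out) := by unfold Spec_build_dp; infer_instance

-- ===== CLAIM (what is proved, stated in full; the proofs are below) =====
def Claim_equal_build_dp : Prop := ∀ (C : Int), Dom_build_dp C → Spec_build_dp C (build_dp C)

-- ===== LEMMAS AND PROOFS =====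

-- The pure value computed (and cached) by B's f at (day, cows).
def fB (C : Int) : Nat → Int → Int
  | 0, _ => 1
  | d + 1, cows =>
    let doubled := cows * 2
    if doubled ≤ C then fB C d doubled
    else
      let full := PySem.Int.floordiv doubled C
      let rest := PySem.Int.mod doubled C
      let res := full * fB C d C
      if rest ≠ 0 then res + fB C d rest else res

-- Row d of the table of fB-values.
def rowB (C : Int) (d : Nat) : List Int :=
  (PySem.List.pyRange 0 (C + 1) 1).map (fun cows => fB C d cows)

-- A's dp after rows 0..d have been filled (later rows still all-zero).
def stateA (C : Int) (d : Nat) : List (List Int) :=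
  (List.range 51).map (fun j => if j ≤ d then rowB C j else List.replicate (C + 1).toNat 0)

-- The value A stores in cell (day, cows), as a function of the previous row.
def Fstep (C : Int) (prev : List Int) (cows : Int) : Int :=
  if cows * 2 ≤ C then
    PySem.List.pyGetD prev (cows * 2) 0
  else
    let full := PySem.Int.floordiv (cows * 2) C
    let rest := PySem.Int.mod (cows * 2) C
    let farms := full * PySem.List.pyGetD prev C 0
    if rest ≠ 0 then farms + PySem.List.pyGetD prev rest 0 else farms

-- A's outer-loop body.
def stepFun (C : Int) : List (List Int) → Int → List (List Int) :=
  fun dp day =>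
    (PySem.List.pyRange 0 (C + 1) 1).foldl (fun dp cows =>
      dp.modify day.toNat (fun row =>
        row.set cows.toNat (Fstep C (PySem.List.pyGetD dp (day - 1) []) cows))) dp

-- setting every index of a row in turn is mapping over it
theorem setfold_aux (g : Nat → Int) :
    ∀ (j i : Nat) (l : List Int), i + j = l.length →
      (List.range' i j).foldl (fun r k => r.set k (g k)) l
        = l.take i ++ (List.range' i j).map g := by
  intro j
  induction j with
  | zero =>
    intro i l h
    rw [show List.range' i 0 = [] from rfl]
    simp only [List.foldl_nil, List.map_nil, List.append_nil]
    rw [List.take_of_length_le (by omega)]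
  | succ j ih =>
    intro i l h
    rw [List.range'_succ]
    simp only [List.foldl_cons, List.map_cons]
    rw [ih (i + 1) (l.set i (g i)) (by simp; omega)]
    have hi : i < l.length := by omega
    have htake : (l.set i (g i)).take (i + 1) = l.take i ++ [g i] := by
      rw [List.take_add_one]
      rw [List.take_set_of_le (Nat.le_refl i)]
      rw [List.getElem?_set_self (by omega)]
      rfl
    rw [htake]
    simp

theorem setfold (g : Nat → Int) (m : Nat) (l : List Int) (h : l.length = m) :
    (List.range m).foldl (fun r k => r.set k (g k)) l = (List.range m).map g := by
  rw [List.range_eq_range']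
  simpa using setfold_aux g m 0 l (by omega)

theorem modify_modify (dp : List (List Int)) (q : Nat) (f g : List Int → List Int) :
    (dp.modify q f).modify q g = dp.modify q (fun r => g (f r)) := by
  apply List.ext_getElem (by simp)
  intro j h1 h2
  simp only [List.getElem_modify]
  split <;> rfl

-- a fold of modifies at one fixed index is one modify by the folded row function
theorem fold_modify_const (q : Nat) (h : Int → List Int → List Int) :
    ∀ (cs : List Int) (dp : List (List Int)),
      cs.foldl (fun dp cows => dp.modify q (h cows)) dp
        = dp.modify q (fun r => cs.foldl (fun r cows => h cows r) r) := by
  intro cs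
  induction cs with
  | nil =>
    intro dp
    apply List.ext_getElem (by simp)
    intro j h1 h2
    simp only [List.foldl_nil, List.getElem_modify]
    split <;> rfl
  | cons c cs ih =>
    intro dp
    simp only [List.foldl_cons]
    rw [ih, modify_modify]

theorem pyGetD_modify_ne (dp : List (List Int)) (q : Nat) (f : List Int → List Int)
    (p : Int) (h0 : 0 ≤ p) (hne : p.toNat ≠ q) :
    PySem.List.pyGetD (dp.modify q f) p [] = PySem.List.pyGetD dp p [] := by
  by_cases hp : p < (dp.length : Int)
  · rw [PySem.List.pyGetD_eq_getElem _ _ h0 (by simpa using hp),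
      PySem.List.pyGetD_eq_getElem _ _ h0 hp]
    rw [List.getElem_modify]
    simp [Ne.symm hne]
  · simp only [PySem.List.pyGetD, PySem.List.pyGet?, PySem.List.pyIdx?, List.length_modify,
      h0, if_true]
    have : ¬ p < ((dp.length : Int)) := hp
    simp [this]

-- the reads of row day-1 stay constant through the inner fold
theorem fold_read_const (q : Nat) (p : Int) (h0 : 0 ≤ p) (hne : p.toNat ≠ q)
    (prev : List Int) (C : Int) :
    ∀ (cs : List Int) (dp : List (List Int)), PySem.List.pyGetD dp p [] = prev →
      cs.foldl (fun dp cows =>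
          dp.modify q (fun row => row.set cows.toNat (Fstep C (PySem.List.pyGetD dp p []) cows))) dp
        = cs.foldl (fun dp cows =>
          dp.modify q (fun row => row.set cows.toNat (Fstep C prev cows))) dp := by
  intro cs
  induction cs with
  | nil => intro dp _; rfl
  | cons c cs ih =>
    intro dp hdp
    simp only [List.foldl_cons, hdp]
    exact ih _ (by rw [pyGetD_modify_ne _ _ _ _ h0 hne, hdp])

-- filling one row cell by cell is mapping the value function over the range
theorem rowfold (C : Int) (G : Int → Int) (l : List Int) (hl : l.length = (C + 1).toNat) :
    (PySem.List.pyRange 0 (C + 1) 1).foldl (fun r cows => r.set cows.toNat (G cows)) l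
      = (PySem.List.pyRange 0 (C + 1) 1).map G := by
  rw [PySem.List.pyRange_one]
  rw [List.foldl_map, List.map_map]
  have : ((C + 1 : Int) - 0).toNat = (C + 1).toNat := by omega
  rw [this]
  have := setfold (fun k => G (0 + (k : Int))) (C + 1).toNat l (by omega)
  simpa using this

-- the cell value A computes from row d equals fB C (d+1)
theorem step_cell (C : Int) (d : Nat) (cows : Int) (h0 : 0 ≤ cows) (hC : cows < C + 1) :
    Fstep C (rowB C d) cows = fB C (d + 1) cows := by
  have hCnn : 0 ≤ C := by omega
  rw [fB, Fstep]
  simp only [rowB]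
  by_cases hle : cows * 2 ≤ C
  · simp only [hle, if_true]
    rw [PySem.List.pyGetD_map_pyRange_of_nonneg _ _ _ _ (by omega) (by omega)]
  · have hCpos : 0 < C := by
      by_contra h
      have hc0 : C = 0 := by omega
      have : cows = 0 := by omega
      omega
    simp only [hle, if_false]
    have hrest0 : 0 ≤ PySem.Int.mod (cows * 2) C := PySem.Int.mod_nonneg _ hCpos
    have hrestlt : PySem.Int.mod (cows * 2) C < C := PySem.Int.mod_lt _ hCpos
    rw [PySem.List.pyGetD_map_pyRange_of_nonneg _ _ _ _ hCnn (by omega)]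
    by_cases hr : PySem.Int.mod (cows * 2) C ≠ 0
    · rw [if_pos hr, if_pos hr,
        PySem.List.pyGetD_map_pyRange_of_nonneg _ _ _ _ hrest0 (by omega)]
    · rw [if_neg hr, if_neg hr]

theorem row_succ (C : Int) (d : Nat) :
    (PySem.List.pyRange 0 (C + 1) 1).map (Fstep C (rowB C d)) = rowB C (d + 1) := by
  rw [rowB]
  apply List.map_congr_left
  intro x hx
  rw [PySem.List.mem_pyRange_one] at hx
  exact step_cell C d x hx.1 hx.2

theorem stateA_read (C : Int) (d : Nat) (hd : d < 51) :
    PySem.List.pyGetD (stateA C d) (d : Int) [] = rowB C d := by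
  have hlen : (stateA C d).length = 51 := by simp [stateA]
  rw [PySem.List.pyGetD_eq_getElem _ _ (by omega) (by rw [hlen]; exact_mod_cast (by omega : (d : Int) < 51))]
  have hdn : ((d : Int)).toNat = d := by omega
  simp only [stateA, hdn, List.getElem_map, List.getElem_range]
  simp

-- one outer-loop iteration takes stateA d to stateA (d+1)
theorem step_state (C : Int) (d : Nat) (hd : d < 50) :
    stepFun C (stateA C d) ((d : Int) + 1) = stateA C (d + 1) := by
  rw [stepFun]
  have hday : ((d : Int) + 1) - 1 = (d : Int) := by ring
  have htn : ((d : Int) + 1).toNat = d + 1 := by omega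
  simp only [hday, htn]
  rw [fold_read_const (d + 1) (d : Int) (by omega) (by omega) (rowB C d) C _ _
    (stateA_read C d (by omega))]
  rw [fold_modify_const]
  apply List.ext_getElem (by simp [stateA])
  intro j h1 h2
  have hj : j < 51 := by simpa [stateA] using h1
  simp only [List.getElem_modify, stateA, List.getElem_map, List.getElem_range]
  by_cases hje : d + 1 = j
  · subst hje
    simp only []
    have hnot : ¬ d + 1 ≤ d := by omega
    simp only [hnot, if_false, Nat.le_refl, if_true]
    rw [rowfold C _ _ (by simp)]
    exact row_succ C d
  · simp only [hje, if_false]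
    by_cases hle : j ≤ d
    · simp only [hle, if_true, (by omega : j ≤ d + 1), if_true]
    · have hna : ¬ j ≤ d + 1 := by omega
      simp [hle, hna]

-- the first loop (row 0) produces stateA C 0
theorem init_state (C : Int) :
    (PySem.List.pyRange 0 (C + 1) 1).foldl
        (fun dp cows => dp.modify 0 (fun row => row.set cows.toNat 1))
        (List.replicate 51 (List.replicate (C + 1).toNat 0)) = stateA C 0 := by
  rw [fold_modify_const]
  apply List.ext_getElem (by simp [stateA])
  intro j h1 h2
  have hj : j < 51 := by simpa using h1
  simp only [List.getElem_modify, List.getElem_replicate, stateA, List.getElem_map,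
    List.getElem_range]
  by_cases hj0 : 0 = j
  · subst hj0
    simp only [Nat.le_refl, if_true]
    rw [rowfold C (fun _ => 1) _ (by simp)]
    rw [rowB]
    apply List.map_congr_left
    intro x _
    rw [fB]
  · simp only [hj0, if_false]
    have : ¬ j ≤ 0 := by omega
    simp [this]

theorem outer_state (C : Int) :
    ∀ (d : Nat), d ≤ 50 →
      (PySem.List.pyRange 1 (1 + (d : Int)) 1).foldl (stepFun C) (stateA C 0) = stateA C d := by
  intro d
  induction d with
  | zero =>
    intro _
    rw [PySem.List.pyRange_one_eq_nil (by omega)]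
    rfl
  | succ d ih =>
    intro hd
    have h1 : (1 : Int) + (d + 1 : Nat) = (1 + (d : Int)) + 1 := by push_cast; ring
    rw [h1, PySem.List.pyRange_one_succ_right (by omega)]
    rw [List.foldl_append, ih (by omega)]
    simp only [List.foldl_cons, List.foldl_nil]
    have h2 : (1 : Int) + (d : Int) = (d : Int) + 1 := by ring
    rw [h2, step_state C d (by omega)]

theorem build_dp_eq_state (C : Int) : build_dp C = stateA C 50 := by
  show (PySem.List.pyRange 1 51 1).foldl (stepFun C)
      ((PySem.List.pyRange 0 (C + 1) 1).foldl
        (fun dp cows => dp.modify 0 (fun row => row.set cows.toNat 1))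
        (List.replicate 51 (List.replicate (C + 1).toNat 0))) = stateA C 50
  rw [init_state]
  have h : (51 : Int) = 1 + ((50 : Nat) : Int) := by norm_num
  rw [h, outer_state C 50 (by omega)]

theorem state_eq_ranges (C : Int) : stateA C 50 = (List.range 51).map (fun i => rowB C i) := by
  rw [stateA]
  apply List.map_congr_left
  intro j hj
  rw [List.mem_range] at hj
  rw [if_pos (by omega : j ≤ 50)]

-- ====== B-side: the memoized recursion computes fB ======

-- memo well-formedness: 51 rows of width (C+1).toNat, every filled cell holds its fB-value
def InvM (C : Int) (m : List (List (Option Int))) : Prop :=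
  m.length = 51 ∧ (∀ i : Nat, i < 51 → (m.getD i []).length = (C + 1).toNat) ∧
  (∀ i j : Nat, (m.getD i []).getD j none = none ∨
    (m.getD i []).getD j none = some (fB C i (j : Int)))

-- filled cells are never unfilled
def MonoM (m m' : List (List (Option Int))) : Prop :=
  ∀ (i j : Nat) (v : Int), (m.getD i []).getD j none = some v →
    (m'.getD i []).getD j none = some v

theorem monoM_rfl (m : List (List (Option Int))) : MonoM m m := fun _ _ _ h => h

theorem monoM_trans {m1 m2 m3 : List (List (Option Int))}
    (h1 : MonoM m1 m2) (h2 : MonoM m2 m3) : MonoM m1 m3 :=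
  fun i j v h => h2 i j v (h1 i j v h)

theorem getD_modify_ne' {α : Type} (m : List α) (d : α) (q i : Nat) (f : α → α) (h : i ≠ q) :
    (m.modify q f).getD i d = m.getD i d := by
  simp only [List.getD, List.getElem?_modify, Ne.symm h, if_false]
  cases m[i]? <;> rfl

theorem getD_modify_self' {α : Type} (m : List α) (d : α) (q : Nat) (f : α → α)
    (h : q < m.length) :
    (m.modify q f).getD q d = f (m.getD q d) := by
  simp [List.getD, List.getElem?_eq_getElem h]

theorem getD_set_ne' {α : Type} (row : List α) (d : α) (k j : Nat) (v : α) (h : j ≠ k) :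
    (row.set k v).getD j d = row.getD j d := by
  simp only [List.getD, List.getElem?_set, Ne.symm h, if_false]

theorem getD_set_self' {α : Type} (row : List α) (d : α) (k : Nat) (v : α)
    (h : k < row.length) :
    (row.set k v).getD k d = v := by
  simp [List.getD, h]

-- writing a correct value into a cell preserves the invariant
theorem inv_write (C : Int) (m : List (List (Option Int))) (hm : InvM C m)
    (day k : Nat) (hday : day < 51) (hk : k < (C + 1).toNat) :
    InvM C (m.modify day (fun row => row.set k (some (fB C day (k : Int))))) ∧
    MonoM m (m.modify day (fun row => row.set k (some (fB C day (k : Int))))) ∧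
    ((m.modify day (fun row => row.set k (some (fB C day (k : Int))))).getD day []).getD k none
      = some (fB C day (k : Int)) := by
  obtain ⟨h1, h2, h3⟩ := hm
  have hdl : day < m.length := by omega
  have hkl : k < (m.getD day []).length := by rw [h2 day hday]; exact hk
  have hrow : (m.modify day (fun row => row.set k (some (fB C day (k : Int))))).getD day []
      = (m.getD day []).set k (some (fB C day (k : Int))) := getD_modify_self' _ _ _ _ hdl
  refine ⟨⟨by simp [List.length_modify, h1], ?_, ?_⟩, ?_, ?_⟩
  · intro i hi
    by_cases hie : i = day
    · subst hie; rw [hrow, List.length_set]; exact h2 i hi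
    · rw [getD_modify_ne' _ _ _ _ _ hie]; exact h2 i hi
  · intro i j
    by_cases hie : i = day
    · subst hie
      rw [hrow]
      by_cases hje : j = k
      · subst hje; rw [getD_set_self' _ _ _ _ hkl]; right; rfl
      · rw [getD_set_ne' _ _ _ _ _ hje]; exact h3 _ _
    · rw [getD_modify_ne' _ _ _ _ _ hie]; exact h3 _ _
  · intro i j v hv
    by_cases hie : i = day
    · by_cases hje : j = k
      · rw [hie, hje] at hv
        rw [hie, hje, hrow, getD_set_self' _ _ _ _ hkl]
        rcases h3 day k with h | h
        · rw [h] at hv; cases hv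
        · rw [h] at hv; rw [← hv]
      · rw [hie] at hv
        rw [hie, hrow, getD_set_ne' _ _ _ _ _ hje]
        exact hv
    · rw [getD_modify_ne' _ _ _ _ _ hie]; exact hv
  · rw [hrow, getD_set_self' _ _ _ _ hkl]

-- the main lemma: fMemo returns fB's value, preserves the invariant, only fills cells,
-- and leaves its own cell filled
theorem read_eq (memo : List (List (Option Int))) (day : Nat) (cows : Int) (hc0 : 0 ≤ cows) :
    PySem.List.pyGetD (PySem.List.pyGetD memo (day : Int) []) cows none
      = (memo.getD day []).getD cows.toNat none := by
  have h2 : ((cows.toNat : Nat) : Int) = cows := by omega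
  conv_lhs => rw [PySem.List.pyGetD_natCast, ← h2, PySem.List.pyGetD_natCast]

-- shared epilogue: writing the computed value r = fB C d1 cows into cell (d1, cows)
theorem finish_write (C : Int) (memo m2 : List (List (Option Int))) (d1 : Nat) (cows r : Int)
    (hm2 : InvM C m2) (hmono : MonoM memo m2) (h51 : d1 < 51) (hc0 : 0 ≤ cows)
    (hc1 : cows < C + 1) (hr : r = fB C d1 cows) :
    r = fB C d1 cows ∧
    InvM C (m2.modify d1 (fun row => row.set cows.toNat (some r))) ∧
    MonoM memo (m2.modify d1 (fun row => row.set cows.toNat (some r))) ∧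
    (((m2.modify d1 (fun row => row.set cows.toNat (some r))).getD d1 []).getD cows.toNat none)
      = some (fB C d1 cows) := by
  subst hr
  have hcast : ((cows.toNat : Nat) : Int) = cows := by omega
  have hk : cows.toNat < (C + 1).toNat := by omega
  have hw := inv_write C m2 hm2 d1 cows.toNat h51 hk
  rw [hcast] at hw
  exact ⟨rfl, hw.1, monoM_trans hmono hw.2.1, hw.2.2⟩

-- the main lemma: fMemo returns fB's value, preserves the invariant, only fills cells,
-- and leaves its own cell filled
theorem fmemo_main (C : Int) :
    ∀ (day : Nat) (memo : List (List (Option Int))) (cows : Int), InvM C memo → day < 51 →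
      0 ≤ cows → cows < C + 1 →
      (fMemo C memo day cows).1 = fB C day cows ∧
      InvM C (fMemo C memo day cows).2 ∧
      MonoM memo (fMemo C memo day cows).2 ∧
      (((fMemo C memo day cows).2.getD day []).getD cows.toNat none)
        = some (fB C day cows) := by
  intro day
  induction day with
  | zero =>
    intro memo cows hm h51 hc0 hc1
    have hcast : ((cows.toNat : Nat) : Int) = cows := by omega
    rcases hcell : (memo.getD 0 []).getD cows.toNat none with _ | r
    · rw [fMemo]
      simp only [read_eq memo 0 cows hc0, hcell]
      have hfb : (1 : Int) = fB C 0 cows := by rw [fB]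
      exact finish_write C memo memo 0 cows 1 hm (monoM_rfl memo) h51 hc0 hc1 hfb
    · rw [fMemo]
      simp only [read_eq memo 0 cows hc0, hcell]
      have hval : r = fB C 0 cows := by
        rcases hm.2.2 0 cows.toNat with h | h
        · rw [h] at hcell; cases hcell
        · rw [hcast] at h
          rw [h] at hcell
          injection hcell with h2
          exact h2.symm
      exact ⟨hval, hm, monoM_rfl memo, by rw [hval]⟩
  | succ d ih =>
    intro memo cows hm h51 hc0 hc1
    have hcast : ((cows.toNat : Nat) : Int) = cows := by omega
    rcases hcell : (memo.getD (d + 1) []).getD cows.toNat none with _ | r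
    · rw [fMemo]
      simp only [read_eq memo (d + 1) cows hc0, hcell]
      by_cases hdb : cows * 2 ≤ C
      · simp only [hdb, if_true]
        obtain ⟨hv1, hm1, hmono1, _⟩ := ih memo (cows * 2) hm (by omega) (by omega) (by omega)
        have hval : (fMemo C memo d (cows * 2)).1 = fB C (d + 1) cows := by
          rw [hv1]
          conv_rhs => rw [fB]
          simp only [hdb, if_true]
        exact finish_write C memo _ (d + 1) cows _ hm1 hmono1 h51 hc0 hc1 hval
      · have hCpos : 0 < C := by
          by_contra h
          have hc0' : C = 0 := by omega
          have : cows = 0 := by omega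
          omega
        have hrest0 : 0 ≤ PySem.Int.mod (cows * 2) C := PySem.Int.mod_nonneg _ hCpos
        have hrestlt : PySem.Int.mod (cows * 2) C < C := PySem.Int.mod_lt _ hCpos
        simp only [hdb, if_false]
        obtain ⟨hvC, hmC, hmonoC, _⟩ := ih memo C hm (by omega) (by omega) (by omega)
        by_cases hrne : PySem.Int.mod (cows * 2) C ≠ 0
        · rw [if_pos hrne]
          obtain ⟨hvr, hmr, hmonor, _⟩ :=
            ih (fMemo C memo d C).2 (PySem.Int.mod (cows * 2) C) hmC (by omega) hrest0 (by omega)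
          have hval : PySem.Int.floordiv (cows * 2) C * (fMemo C memo d C).1 +
              (fMemo C (fMemo C memo d C).2 d (PySem.Int.mod (cows * 2) C)).1
                = fB C (d + 1) cows := by
            rw [hvC, hvr]
            conv_rhs => rw [fB]
            simp only [hdb, if_false]
            rw [if_pos hrne]
          exact finish_write C memo _ (d + 1) cows _ hmr (monoM_trans hmonoC hmonor)
            h51 hc0 hc1 hval
        · rw [if_neg hrne]
          have hval : PySem.Int.floordiv (cows * 2) C * (fMemo C memo d C).1
              = fB C (d + 1) cows := by
            rw [hvC]
            conv_rhs => rw [fB]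
            simp only [hdb, if_false]
            rw [if_neg hrne]
          exact finish_write C memo _ (d + 1) cows _ hmC hmonoC h51 hc0 hc1 hval
    · rw [fMemo]
      simp only [read_eq memo (d + 1) cows hc0, hcell]
      have hval : r = fB C (d + 1) cows := by
        rcases hm.2.2 (d + 1) cows.toNat with h | h
        · rw [h] at hcell; cases hcell
        · rw [hcast] at h
          rw [h] at hcell
          injection hcell with h2
          exact h2.symm
      exact ⟨hval, hm, monoM_rfl memo, by rw [hval]⟩

-- the inner loop forces every cell of one row
theorem inner_fold (C : Int) (day : Nat) (hday : day < 51) :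
    ∀ (cs : List Int), (∀ c ∈ cs, 0 ≤ c ∧ c < C + 1) →
      ∀ memo, InvM C memo →
        InvM C (cs.foldl (fun m c => (fMemo C m day c).2) memo) ∧
        MonoM memo (cs.foldl (fun m c => (fMemo C m day c).2) memo) ∧
        ∀ c ∈ cs, (((cs.foldl (fun m c => (fMemo C m day c).2) memo).getD day []).getD c.toNat none)
          = some (fB C day c) := by
  intro cs
  induction cs with
  | nil => intro _ memo hm; exact ⟨hm, monoM_rfl memo, by simp⟩
  | cons c cs ih =>
    intro hcs memo hm
    obtain ⟨hc0, hc1⟩ := hcs c (by simp)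
    obtain ⟨hv, hm1, hmono1, hcell⟩ := fmemo_main C day memo c hm hday hc0 hc1
    obtain ⟨hm2, hmono2, hforced⟩ := ih (fun x hx => hcs x (by simp [hx])) _ hm1
    refine ⟨hm2, monoM_trans hmono1 hmono2, ?_⟩
    intro x hx
    rcases List.mem_cons.mp hx with hx | hx
    · subst hx
      have := hmono2 day x.toNat (fB C day x) (by rw [← hv] at hcell ⊢; simpa [hv] using hcell)
      simpa using this
    · exact hforced x hx

-- the outer loop forces every cell of the table
theorem outer_fold (C : Int) :
    ∀ (ds : List Int), (∀ dd ∈ ds, 0 ≤ dd ∧ dd < 51) →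
      ∀ memo, InvM C memo →
        InvM C (ds.foldl (fun m dd =>
            (PySem.List.pyRange 0 (C + 1) 1).foldl (fun m c => (fMemo C m dd.toNat c).2) m) memo) ∧
        MonoM memo (ds.foldl (fun m dd =>
            (PySem.List.pyRange 0 (C + 1) 1).foldl (fun m c => (fMemo C m dd.toNat c).2) m) memo) ∧
        ∀ dd ∈ ds, ∀ c : Int, 0 ≤ c → c < C + 1 →
          ((((ds.foldl (fun m dd =>
              (PySem.List.pyRange 0 (C + 1) 1).foldl (fun m c => (fMemo C m dd.toNat c).2) m) memo).getD
            dd.toNat []).getD c.toNat none)) = some (fB C dd.toNat c) := by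
  intro ds
  induction ds with
  | nil => intro _ memo hm; exact ⟨hm, monoM_rfl memo, by simp⟩
  | cons dd ds ih =>
    intro hds memo hm
    obtain ⟨hd0, hd1⟩ := hds dd (by simp)
    have hdn : dd.toNat < 51 := by omega
    obtain ⟨hm1, hmono1, hforced1⟩ := inner_fold C dd.toNat hdn (PySem.List.pyRange 0 (C + 1) 1)
      (fun c hc => by rw [PySem.List.mem_pyRange_one] at hc; exact hc) memo hm
    obtain ⟨hm2, hmono2, hforced2⟩ := ih (fun x hx => hds x (by simp [hx])) _ hm1
    refine ⟨hm2, monoM_trans hmono1 hmono2, ?_⟩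
    intro x hx c hc0 hc1
    rcases List.mem_cons.mp hx with hx | hx
    · subst hx
      exact hmono2 _ _ _ (hforced1 c (by rw [PySem.List.mem_pyRange_one]; exact ⟨hc0, hc1⟩))
    · exact hforced2 x hx c hc0 hc1

theorem inv0 (C : Int) :
    InvM C (List.replicate 51 (List.replicate (C + 1).toNat (none : Option Int))) := by
  refine ⟨by rw [List.length_replicate], ?_, ?_⟩
  · intro i hi
    rw [List.getD_eq_getElem _ _ (by rw [List.length_replicate]; exact hi)]
    rw [List.getElem_replicate, List.length_replicate]
  · intro i j
    left
    by_cases hi : i < 51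
    · rw [List.getD_eq_getElem (List.replicate 51 (List.replicate (C + 1).toNat none)) []
          (show i < _ by rw [List.length_replicate]; exact hi), List.getElem_replicate]
      by_cases hj : j < (C + 1).toNat
      · rw [List.getD_eq_getElem _ _ (by rw [List.length_replicate]; exact hj),
          List.getElem_replicate]
      · rw [List.getD_eq_default _ _ (by rw [List.length_replicate]; omega)]
    · rw [List.getD_eq_default (List.replicate 51 (List.replicate (C + 1).toNat none)) []
        (by rw [List.length_replicate]; omega)]
      rfl

theorem alt_eq_ranges (C : Int) : build_dp_alt C = (List.range 51).map (fun i => rowB C i) := by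
  show ((PySem.List.pyRange 0 51 1).foldl (fun memo day =>
      (PySem.List.pyRange 0 (C + 1) 1).foldl (fun memo cows => (fMemo C memo day.toNat cows).2) memo)
      (List.replicate 51 (List.replicate (C + 1).toNat none))).map
        (fun row => row.map (fun o => o.getD 0))
    = (List.range 51).map (fun i => rowB C i)
  obtain ⟨hmF, _, hforced⟩ := outer_fold C (PySem.List.pyRange 0 51 1)
    (fun dd hdd => by rw [PySem.List.mem_pyRange_one] at hdd; exact hdd) _ (inv0 C)
  set memoF := (PySem.List.pyRange 0 51 1).foldl (fun memo day =>
      (PySem.List.pyRange 0 (C + 1) 1).foldl (fun memo cows => (fMemo C memo day.toNat cows).2) memo)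
      (List.replicate 51 (List.replicate (C + 1).toNat none)) with hMF
  obtain ⟨hlen, hrows, _⟩ := hmF
  apply List.ext_getElem (by simp [hlen])
  intro i h1 h2
  have hi : i < 51 := by simpa [hlen] using h2
  have hilen : i < memoF.length := by omega
  have hrow : memoF.getD i [] = memoF[i] := List.getD_eq_getElem _ _ hilen
  have hrl : memoF[i].length = (C + 1).toNat := by rw [← hrow]; exact hrows i hi
  rw [List.getElem_map, List.getElem_map, List.getElem_range]
  apply List.ext_getElem
  · simp only [List.length_map, hrl, rowB, PySem.List.length_pyRange_one]
    omega
  intro j hj1 hj2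
  have hjN : j < (C + 1).toNat := by simpa [hrl] using hj1
  have hcell := hforced (i : Int)
    (by rw [PySem.List.mem_pyRange_one]; exact ⟨by omega, by omega⟩)
    (j : Int) (by omega) (by omega)
  rw [Int.toNat_natCast, Int.toNat_natCast, hrow,
    List.getD_eq_getElem _ _ (by omega : j < memoF[i].length)] at hcell
  rw [List.getElem_map, hcell]
  simp only [rowB, List.getElem_map, PySem.List.getElem_pyRange_one]
  simp

-- ===== VERDICT (by name: the statement is the Claim_ definition above) =====
theorem build_dp_spec : Claim_equal_build_dp := by
  intro C _
  unfold Spec_build_dp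
  rw [build_dp_eq_state, state_eq_ranges, alt_eq_ranges]
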